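-- pv_equiv track=rewrite | github.com/zhakil/poe2build | src/poe2build/rag/data_preprocessor.py | _infer_skill_tags
-- ===== SOURCE A (Python) =====
-- from typing import Dict, List, Optional, Tuple, Any, Set
--
-- def _infer_skill_tags(skill_name: str) -> Set[str]:
--     """从技能名称推断标签"""
--     tags = set()
--
--     if not skill_name:
--         return tags
--
--     skill_lower = skill_name.lower()
--
--     # 技能类型标签
--     if any(word in skill_lower for word in ['arrow', 'shot', 'projectile']):
--         tags.add("projectile")
--
--     if any(word in skill_lower for word in ['fire', 'flame', 'burn', 'ignite']):
--         tags.add("fire_damage")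
--
--     if any(word in skill_lower for word in ['ice', 'cold', 'freeze', 'glacial']):
--         tags.add("cold_damage")
--
--     if any(word in skill_lower for word in ['lightning', 'shock', 'spark', 'arc']):
--         tags.add("lightning_damage")
--
--     if any(word in skill_lower for word in ['minion', 'skeleton', 'zombie', 'summon']):
--         tags.add("minion_build")
--
--     if any(word in skill_lower for word in ['aura', 'curse', 'buff']):
--         tags.add("support_skill")
--
--     return tags
-- ===== SOURCE B (Python) =====
-- _TAG_KEYWORDS = [
--     ("projectile", ["arrow", "shot", "projectile"]),
--     ("fire_damage", ["fire", "flame", "burn", "ignite"]),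
--     ("cold_damage", ["ice", "cold", "freeze", "glacial"]),
--     ("lightning_damage", ["lightning", "shock", "spark", "arc"]),
--     ("minion_build", ["minion", "skeleton", "zombie", "summon"]),
--     ("support_skill", ["aura", "curse", "buff"]),
-- ]
-- _ALL_WORDS = [w for _, ws in _TAG_KEYWORDS for w in ws]
--
-- def _infer_skill_tags(skill_name: str):
--     """Single sliding-window scan: at each position of the lowered name, prefix-match
--     every keyword (no substring 'in' tests); then map the found keywords to tags."""
--     tags = set()
--     if not skill_name:
--         return tags
--     low = skill_name.lower()
--     found = set()
--     for i in range(len(low)):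
--         for word in _ALL_WORDS:
--             if low.startswith(word, i):
--                 found.add(word)
--     for tag, words in _TAG_KEYWORDS:
--         if any(w in found for w in words):
--             tags.add(tag)
--     return tags
-- ===== Notes on version B (the rewrite author's own statement) =====
-- stated objective: alternative
-- what changed: Replaces six per-tag substring-membership branches by a multi-pattern matcher: one sliding-window scan over the lowered name that prefix-matches every keyword at each position, followed by a data-driven keyword-to-tag mapping pass.
import Mathlib
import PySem

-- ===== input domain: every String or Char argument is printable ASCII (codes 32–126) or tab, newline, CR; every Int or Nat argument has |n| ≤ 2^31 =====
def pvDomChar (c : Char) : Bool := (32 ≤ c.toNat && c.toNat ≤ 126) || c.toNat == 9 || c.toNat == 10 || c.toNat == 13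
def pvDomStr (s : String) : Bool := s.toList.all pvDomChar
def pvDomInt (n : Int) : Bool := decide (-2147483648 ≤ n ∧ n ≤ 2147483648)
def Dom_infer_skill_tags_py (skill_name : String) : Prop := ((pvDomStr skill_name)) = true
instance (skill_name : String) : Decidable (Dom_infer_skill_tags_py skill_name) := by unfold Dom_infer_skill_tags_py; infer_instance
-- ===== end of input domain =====

-- B replaces A's six per-tag substring-membership branches by one sliding-window scan that
-- prefix-matches every keyword at each position, then maps found keywords to tags (alternative).

-- ===== PORT A =====
def infer_skill_tags_py (skill_name : String) : List String :=
  let tags : PySem.Set String := PySem.Set.empty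
  if skill_name = "" then tags
  else
    let skill_lower := PySem.Str.lower skill_name
    let tags := if ["arrow", "shot", "projectile"].any (fun w => PySem.Str.isIn w skill_lower)
                then PySem.Set.add tags "projectile" else tags
    let tags := if ["fire", "flame", "burn", "ignite"].any (fun w => PySem.Str.isIn w skill_lower)
                then PySem.Set.add tags "fire_damage" else tags
    let tags := if ["ice", "cold", "freeze", "glacial"].any (fun w => PySem.Str.isIn w skill_lower)
                then PySem.Set.add tags "cold_damage" else tags
    let tags := if ["lightning", "shock", "spark", "arc"].any (fun w => PySem.Str.isIn w skill_lower)
                then PySem.Set.add tags "lightning_damage" else tags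
    let tags := if ["minion", "skeleton", "zombie", "summon"].any (fun w => PySem.Str.isIn w skill_lower)
                then PySem.Set.add tags "minion_build" else tags
    let tags := if ["aura", "curse", "buff"].any (fun w => PySem.Str.isIn w skill_lower)
                then PySem.Set.add tags "support_skill" else tags
    tags

-- ===== PORT B =====
def pvTagKeywords : List (String × List String) :=
  [ ("projectile", ["arrow", "shot", "projectile"])
  , ("fire_damage", ["fire", "flame", "burn", "ignite"])
  , ("cold_damage", ["ice", "cold", "freeze", "glacial"])
  , ("lightning_damage", ["lightning", "shock", "spark", "arc"])
  , ("minion_build", ["minion", "skeleton", "zombie", "summon"])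
  , ("support_skill", ["aura", "curse", "buff"]) ]

def pvAllWords : List String := pvTagKeywords.flatMap (fun p => p.2)

-- the scan over one position i: 'for word in _ALL_WORDS: if low.startswith(word, i): found.add(word)'
-- Python's low.startswith(word, i) with 0 ≤ i is an exact prefix match at offset i: Chars.startswith (low.drop i) word
def pvScanAt (low : List Char) (found : PySem.Set String) (i : Nat) : PySem.Set String :=
  pvAllWords.foldl
    (fun found w => if PySem.Chars.startswith (low.drop i) w.toList then PySem.Set.add found w else found)
    found

def infer_skill_tags_py_alt (skill_name : String) : List String :=
  let tags : PySem.Set String := PySem.Set.empty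
  if skill_name = "" then tags
  else
    let low := (PySem.Str.lower skill_name).toList
    -- 'for i in range(len(low))': indices 0..len-1, nonnegative, ported as List.range (exact here)
    let found := (List.range low.length).foldl (pvScanAt low) PySem.Set.empty
    pvTagKeywords.foldl
      (fun tags p => if p.2.any (fun w => PySem.Set.contains found w) then PySem.Set.add tags p.1 else tags)
      tags

-- ===== PRECONDITION & SPEC =====
def Spec_infer_skill_tags_py (skill_name : String) (out : List String) : Prop := out = infer_skill_tags_py_alt skill_name
instance (skill_name : String) (out : List String) : Decidable (Spec_infer_skill_tags_py skill_name out) := by unfold Spec_infer_skill_tags_py; infer_instance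

-- ===== CLAIM (what is proved, stated in full; the proofs are below) =====
def Claim_equal_infer_skill_tags_py : Prop := ∀ (skill_name : String), Dom_infer_skill_tags_py skill_name → Spec_infer_skill_tags_py skill_name (infer_skill_tags_py skill_name)

-- ===== LEMMAS AND PROOFS =====

-- membership in the inner word-fold at one position
lemma mem_pvScanAt (low : List Char) (found : PySem.Set String) (i : Nat) (x : String) :
    x ∈ pvScanAt low found i ↔ x ∈ found ∨ (x ∈ pvAllWords ∧ x.toList <+: low.drop i) := by
  unfold pvScanAt
  generalize pvAllWords = ws
  induction ws generalizing found with
  | nil => simp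
  | cons w ws ih =>
    simp only [List.foldl_cons, ih, List.mem_cons]
    by_cases h : PySem.Chars.startswith (low.drop i) w.toList = true
    · rw [if_pos h]
      simp only [PySem.Set.mem_add]
      constructor
      · rintro ((hf | rfl) | hb)
        · exact Or.inl hf
        · exact Or.inr ⟨Or.inl rfl, (PySem.Chars.startswith_iff _ _).1 h⟩
        · exact Or.inr ⟨Or.inr hb.1, hb.2⟩
      · rintro (hf | ⟨(rfl | hm), hp⟩)
        · exact Or.inl (Or.inl hf)
        · exact Or.inl (Or.inr rfl)
        · exact Or.inr ⟨hm, hp⟩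
    · rw [if_neg h]
      constructor
      · rintro (hf | hb)
        · exact Or.inl hf
        · exact Or.inr ⟨Or.inr hb.1, hb.2⟩
      · rintro (hf | ⟨(rfl | hm), hp⟩)
        · exact Or.inl hf
        · exact absurd ((PySem.Chars.startswith_iff _ _).2 hp) h
        · exact Or.inr ⟨hm, hp⟩

-- membership in the full scan
lemma mem_scan (low : List Char) (x : String) :
    x ∈ (List.range low.length).foldl (pvScanAt low) PySem.Set.empty ↔
      (x ∈ pvAllWords ∧ ∃ i < low.length, x.toList <+: low.drop i) := by
  have key : ∀ (is : List Nat) (found : PySem.Set String),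
      x ∈ is.foldl (pvScanAt low) found ↔
        x ∈ found ∨ (x ∈ pvAllWords ∧ ∃ i ∈ is, x.toList <+: low.drop i) := by
    intro is
    induction is with
    | nil => simp
    | cons i is ih =>
      intro found
      simp only [List.foldl_cons, ih, mem_pvScanAt, List.mem_cons]
      constructor
      · rintro ((hf | ⟨hm, hp⟩) | ⟨hm, j, hj, hp⟩)
        · exact Or.inl hf
        · exact Or.inr ⟨hm, i, Or.inl rfl, hp⟩
        · exact Or.inr ⟨hm, j, Or.inr hj, hp⟩
      · rintro (hf | ⟨hm, j, (rfl | hj), hp⟩)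
        · exact Or.inl (Or.inl hf)
        · exact Or.inl (Or.inr ⟨hm, hp⟩)
        · exact Or.inr ⟨hm, j, hj, hp⟩
  rw [key]
  simp [PySem.Set.empty, List.mem_range]

-- for a nonempty keyword, being found by the scan is Python's substring test
lemma contains_scan_eq_isIn (skill_lower : String) (w : String)
    (hw : w ∈ pvAllWords) (hne : w.toList ≠ []) :
    PySem.Set.contains ((List.range skill_lower.toList.length).foldl (pvScanAt skill_lower.toList) PySem.Set.empty) w
      = PySem.Str.isIn w skill_lower := by
  by_cases h : PySem.Str.isIn w skill_lower = true
  · rw [h]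
    rw [PySem.Set.contains_iff, mem_scan]
    refine ⟨hw, ?_⟩
    rw [PySem.Str.isIn_eq] at h
    obtain ⟨j, hj⟩ := (PySem.Chars.exists_prefix_drop_iff_isIn w.toList skill_lower.toList).2 h
    refine ⟨j, ?_, hj⟩
    by_contra hlt
    push Not at hlt
    rw [List.drop_eq_nil_of_le hlt] at hj
    exact hne (List.prefix_nil.1 hj)
  · rw [eq_false_of_ne_true h]
    rw [← Bool.not_eq_true, PySem.Set.contains_iff, mem_scan]
    rintro ⟨-, j, -, hj⟩
    exact h ((PySem.Str.isIn_eq w skill_lower ▸ (PySem.Chars.exists_prefix_drop_iff_isIn w.toList skill_lower.toList).1 ⟨j, hj⟩))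

-- ===== VERDICT (by name: the statement is the Claim_ definition above) =====
theorem infer_skill_tags_py_spec : Claim_equal_infer_skill_tags_py := by
  intro s _
  unfold Spec_infer_skill_tags_py infer_skill_tags_py infer_skill_tags_py_alt
  by_cases hs : s = ""
  · simp [hs]
  · simp only [if_neg hs]
    have hc : ∀ w, w ∈ pvAllWords → w.toList ≠ [] →
        PySem.Set.contains ((List.range (PySem.Str.lower s).toList.length).foldl (pvScanAt (PySem.Str.lower s).toList) PySem.Set.empty) w
          = PySem.Str.isIn w (PySem.Str.lower s) :=
      fun w hw hne => contains_scan_eq_isIn (PySem.Str.lower s) w hw hne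
    simp only [pvTagKeywords, List.foldl_cons, List.foldl_nil, List.any_cons, List.any_nil]
    rw [hc "arrow" (by decide) (by decide), hc "shot" (by decide) (by decide),
        hc "projectile" (by decide) (by decide),
        hc "fire" (by decide) (by decide), hc "flame" (by decide) (by decide),
        hc "burn" (by decide) (by decide), hc "ignite" (by decide) (by decide),
        hc "ice" (by decide) (by decide), hc "cold" (by decide) (by decide),
        hc "freeze" (by decide) (by decide), hc "glacial" (by decide) (by decide),
        hc "lightning" (by decide) (by decide), hc "shock" (by decide) (by decide),
        hc "spark" (by decide) (by decide), hc "arc" (by decide) (by decide),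
        hc "minion" (by decide) (by decide), hc "skeleton" (by decide) (by decide),
        hc "zombie" (by decide) (by decide), hc "summon" (by decide) (by decide),
        hc "aura" (by decide) (by decide), hc "curse" (by decide) (by decide),
        hc "buff" (by decide) (by decide)]
    rfl
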